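-- pv_equiv track=rewrite | github.com/castlhoo/UC_LEAP_Experimental_Agent | step4/phase4c_file_classification/file_classification.py | _merge_confidence
-- ===== SOURCE A (Python) =====
-- from typing import Any, Dict, List, Optional
--
-- def _merge_confidence(confidences: List[str]) -> str:
--     values = {c for c in confidences if c}
--     if "low" in values:
--         return "low"
--     if "medium" in values:
--         return "medium"
--     if "high" in values:
--         return "high"
--     return "low"
-- ===== SOURCE B (Python) =====
-- def _merge_confidence(confidences):
--     order = {'low': 0, 'medium': 1, 'high': 2}
--     ranks = [order[c] for c in confidences if c in order]
--     if not ranks: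
--         return 'low'
--     return ('low', 'medium', 'high')[min(ranks)]
-- ===== Notes on version B (the rewrite author's own statement) =====
-- stated objective: idiomatic
-- what changed: Replaces the set comprehension plus three sequential membership checks with a rank table, a single filtered min-reduction over the ranks, and an indexed tuple mapping the minimum rank back to its level.
import Mathlib
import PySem

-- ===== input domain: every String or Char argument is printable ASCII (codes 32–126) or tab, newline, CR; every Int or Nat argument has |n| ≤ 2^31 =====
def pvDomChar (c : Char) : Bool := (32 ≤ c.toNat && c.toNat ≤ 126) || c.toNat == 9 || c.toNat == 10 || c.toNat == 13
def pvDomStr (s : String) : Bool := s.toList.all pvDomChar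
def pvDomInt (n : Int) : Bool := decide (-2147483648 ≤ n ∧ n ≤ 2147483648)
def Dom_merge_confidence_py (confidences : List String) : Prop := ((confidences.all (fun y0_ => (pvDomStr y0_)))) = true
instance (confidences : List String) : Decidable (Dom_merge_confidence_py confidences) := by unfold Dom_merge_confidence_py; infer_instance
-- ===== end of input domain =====

-- B replaces A's set comprehension + three membership checks by a rank table, one
-- min-reduction over the ranks present, and an indexed level table (idiomatic, same cost).

-- ===== PORT A =====
def merge_confidence_py (confidences : List String) : String :=
  let values : PySem.Set String := PySem.Set.ofList (confidences.filter (fun c => c ≠ ""))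
  if PySem.Set.contains values "low" then "low"
  else if PySem.Set.contains values "medium" then "medium"
  else if PySem.Set.contains values "high" then "high"
  else "low"

-- ===== PORT B =====
-- order = {'low':0,'medium':1,'high':2}; lookup 'order[c] for c in confidences if c in order'
def pvRank? (c : String) : Option Nat :=
  if c = "low" then some 0
  else if c = "medium" then some 1
  else if c = "high" then some 2
  else none

def merge_confidence_py_alt (confidences : List String) : String :=
  let ranks := confidences.filterMap pvRank?
  match PySem.List.min? ranks (fun r => r) with
  | none => "low"
  | some m => ["low", "medium", "high"].getD m "low"

-- ===== PRECONDITION & SPEC =====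
def Spec_merge_confidence_py (confidences : List String) (out : String) : Prop := out = merge_confidence_py_alt confidences
instance (confidences : List String) (out : String) : Decidable (Spec_merge_confidence_py confidences out) := by unfold Spec_merge_confidence_py; infer_instance

-- ===== CLAIM (what is proved, stated in full; the proofs are below) =====
def Claim_equal_merge_confidence_py : Prop := ∀ (confidences : List String), Dom_merge_confidence_py confidences → Spec_merge_confidence_py confidences (merge_confidence_py confidences)

-- ===== LEMMAS AND PROOFS =====

-- characterisation of membership in B's rank list
theorem mem_ranks_iff (xs : List String) (r : Nat) :
    r ∈ xs.filterMap pvRank? ↔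
      (r = 0 ∧ "low" ∈ xs) ∨ (r = 1 ∧ "medium" ∈ xs) ∨ (r = 2 ∧ "high" ∈ xs) := by
  simp only [List.mem_filterMap]
  constructor
  · rintro ⟨a, ha, hr⟩
    unfold pvRank? at hr
    split_ifs at hr with h1 h2 h3 <;> simp_all
  · rintro (⟨rfl, h⟩ | ⟨rfl, h⟩ | ⟨rfl, h⟩)
    · exact ⟨"low", h, rfl⟩
    · exact ⟨"medium", h, rfl⟩
    · exact ⟨"high", h, rfl⟩

-- membership in A's set
theorem mem_values_iff (xs : List String) (s : String) (hs : s ≠ "") :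
    PySem.Set.contains (PySem.Set.ofList (xs.filter (fun c => c ≠ ""))) s = true ↔ s ∈ xs := by
  simp [PySem.Set.contains, PySem.Set.mem_ofList, List.mem_filter, hs]

theorem alt_eq (xs : List String) :
    merge_confidence_py_alt xs =
      if "low" ∈ xs then "low"
      else if "medium" ∈ xs then "medium"
      else if "high" ∈ xs then "high"
      else "low" := by
  unfold merge_confidence_py_alt
  by_cases hl : "low" ∈ xs
  · have h0 : (0 : Nat) ∈ xs.filterMap pvRank? := (mem_ranks_iff xs 0).mpr (Or.inl ⟨rfl, hl⟩)
    rcases hm : PySem.List.min? (xs.filterMap pvRank?) (fun r => r) with _ | m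
    · rw [PySem.List.min?_eq_none_iff] at hm
      simp [hm] at h0
    · have := PySem.List.min?_isMin hm 0 h0
      simp only at this
      interval_cases m
      simp [hm, hl]
  · by_cases hmed : "medium" ∈ xs
    · have h1 : (1 : Nat) ∈ xs.filterMap pvRank? := (mem_ranks_iff xs 1).mpr (Or.inr (Or.inl ⟨rfl, hmed⟩))
      rcases hm : PySem.List.min? (xs.filterMap pvRank?) (fun r => r) with _ | m
      · rw [PySem.List.min?_eq_none_iff] at hm
        simp [hm] at h1
      · have hle := PySem.List.min?_isMin hm 1 h1
        have hmem := PySem.List.min?_mem hm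
        rw [mem_ranks_iff] at hmem
        simp only at hle
        rcases hmem with ⟨rfl, h⟩ | ⟨rfl, _⟩ | ⟨rfl, _⟩
        · exact absurd h hl
        · simp [hm, hl, hmed]
        · omega
    · by_cases hh : "high" ∈ xs
      · have h2 : (2 : Nat) ∈ xs.filterMap pvRank? := (mem_ranks_iff xs 2).mpr (Or.inr (Or.inr ⟨rfl, hh⟩))
        rcases hm : PySem.List.min? (xs.filterMap pvRank?) (fun r => r) with _ | m
        · rw [PySem.List.min?_eq_none_iff] at hm
          simp [hm] at h2
        · have hmem := PySem.List.min?_mem hm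
          rw [mem_ranks_iff] at hmem
          rcases hmem with ⟨rfl, h⟩ | ⟨rfl, h⟩ | ⟨rfl, _⟩
          · exact absurd h hl
          · exact absurd h hmed
          · simp [hm, hl, hmed, hh]
      · have hnil : xs.filterMap pvRank? = [] := by
          rw [List.eq_nil_iff_forall_not_mem]
          intro r hr
          rcases (mem_ranks_iff xs r).mp hr with ⟨_, h⟩ | ⟨_, h⟩ | ⟨_, h⟩
          · exact hl h
          · exact hmed h
          · exact hh h
        rw [hnil]
        simp [PySem.List.min?, hl, hmed, hh]

-- ===== VERDICT (by name: the statement is the Claim_ definition above) =====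
theorem merge_confidence_py_spec : Claim_equal_merge_confidence_py := by
  intro xs _
  unfold Spec_merge_confidence_py merge_confidence_py
  rw [alt_eq]
  simp only [mem_values_iff xs "low" (by decide),
    mem_values_iff xs "medium" (by decide),
    mem_values_iff xs "high" (by decide)]
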